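-- pv_equiv track=rewrite | github.com/zsfreee/Annonimizer | anonymizer.py | merge_adjacent_entities
-- ===== SOURCE A (Python) =====
-- from typing import Dict, List, Tuple, Any, Optional, Union, Set
--
-- def merge_adjacent_entities(entities: List[Tuple[str, int, int, str]]) -> List[Tuple[str, int, int, str]]:
--     """
--     Объединение соседних сущностей одного типа
--
--     Args:
--         entities: список кортежей (текст, начало, конец, тип)
--
--     Returns:
--         список объединенных сущностей
--     """
--     if not entities:
--         return []
--
--     # Сортировка по начальной позиции
--     sorted_entities = sorted(entities, key=lambda x: x[1])
--
--     merged = []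
--     current = None
--
--     for entity in sorted_entities:
--         text, start, end, entity_type = entity
--
--         if current is None:
--             current = entity
--         elif (current[3] == entity_type and  # Одинаковый тип
--               start <= current[2] + 3):      # Находятся рядом (до 3 символов между ними)
--             # Объединяем сущности
--             new_text = current[0] + text[max(0, start - current[2]):]
--             current = (new_text, current[1], end, entity_type)
--         else:
--             merged.append(current)
--             current = entity
--
--     if current:
--         merged.append(current)
--
--     return merged
-- ===== SOURCE B (Python) =====
-- from typing import List, Tuple
--
--
-- def merge_adjacent_entities(entities: List[Tuple[str, int, int, str]]) -> List[Tuple[str, int, int, str]]: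
--     """Two-pass rewrite: group the sorted entities, then fold each group into one tuple."""
--     if not entities:
--         return []
--
--     s = sorted(entities, key=lambda x: x[1])
--
--     # Pass 1: partition into groups of mergeable neighbours.
--     first, *rest = s
--     groups = []
--     group = (first, [])  # (first member, following members)
--     prev = first         # last entity added to the active group
--     for e in rest:
--         if e[3] == prev[3] and e[1] <= prev[2] + 3:
--             group = (group[0], group[1] + [e])
--         else:
--             groups.append(group)
--             group = (e, [])
--         prev = e
--     groups.append(group)
--
--     # Pass 2: fold each group into a single merged entity.
--     result = []
--     for head, tail in groups:
--         cur = head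
--         for m in tail:
--             cur = (cur[0] + m[0][max(0, m[1] - cur[2]):], cur[1], m[2], m[3])
--         result.append(cur)
--     return result
-- ===== Notes on version B (the rewrite author's own statement) =====
-- stated objective: alternative
-- what changed: Single stateful merge loop with an Optional current accumulator is replaced by two passes: first partition the sorted list into groups of mergeable neighbours (tracking only the previously added entity), then fold each group independently into one merged tuple.
import Mathlib
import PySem

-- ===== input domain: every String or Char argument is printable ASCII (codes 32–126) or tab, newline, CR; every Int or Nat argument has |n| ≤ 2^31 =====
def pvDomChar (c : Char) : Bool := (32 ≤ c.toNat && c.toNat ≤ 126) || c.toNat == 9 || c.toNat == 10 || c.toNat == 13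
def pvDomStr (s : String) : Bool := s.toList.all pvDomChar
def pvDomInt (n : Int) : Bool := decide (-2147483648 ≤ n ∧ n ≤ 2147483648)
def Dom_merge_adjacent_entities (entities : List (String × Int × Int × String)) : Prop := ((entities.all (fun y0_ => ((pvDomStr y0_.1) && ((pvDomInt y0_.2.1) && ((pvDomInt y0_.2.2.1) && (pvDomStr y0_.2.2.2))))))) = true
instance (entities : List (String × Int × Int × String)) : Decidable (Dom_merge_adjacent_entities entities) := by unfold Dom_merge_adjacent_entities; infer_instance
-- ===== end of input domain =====

-- B replaces A's single stateful merge loop (Optional current) by two passes — group the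
-- sorted entities, then fold each group into one merged tuple — an alternative decomposition
-- of the same cost; equivalence of return values is proved on the whole domain.


-- ===== PORT A =====
-- A's loop: 'merged' accumulator, 'current' starts as None; merging extends current with
-- text[max(0, start - current[2]):]; after the loop 'if current: merged.append(current)'.
def aLoop (current : Option (String × Int × Int × String))
    (merged : List (String × Int × Int × String)) :
    List (String × Int × Int × String) → List (String × Int × Int × String)
  | [] =>
    match current with
    | none => merged
    | some c => merged ++ [c]
  | e :: es =>
    match current with
    | none => aLoop (some e) merged es
    | some c =>
      if c.2.2.2 = e.2.2.2 ∧ e.2.1 ≤ c.2.2.1 + 3 then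
        aLoop (some (c.1 ++ PySem.Str.slice e.1 (some (max 0 (e.2.1 - c.2.2.1))) none,
                     c.2.1, e.2.2.1, e.2.2.2)) merged es
      else
        aLoop (some e) (merged ++ [c]) es

def merge_adjacent_entities (entities : List (String × Int × Int × String)) : List (String × Int × Int × String) :=
  if entities = [] then []
  else
    let sorted_entities := PySem.List.sorted entities (fun x => x.2.1)
    aLoop none [] sorted_entities

-- ===== PORT B =====
-- B pass 1: partition the sorted list into groups (head, tail); 'prev' is the entity last
-- added to the active group.
def altGroupLoop (prev : String × Int × Int × String)
    (group : (String × Int × Int × String) × List (String × Int × Int × String))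
    (groups : List ((String × Int × Int × String) × List (String × Int × Int × String))) :
    List (String × Int × Int × String) →
    List ((String × Int × Int × String) × List (String × Int × Int × String))
  | [] => groups ++ [group]
  | e :: es =>
    if e.2.2.2 = prev.2.2.2 ∧ e.2.1 ≤ prev.2.2.1 + 3 then
      altGroupLoop e (group.1, group.2 ++ [e]) groups es
    else
      altGroupLoop e (e, []) (groups ++ [group]) es

-- B pass 2: fold one group into a single merged entity.
def altMergeGroup (g : (String × Int × Int × String) × List (String × Int × Int × String)) :
    String × Int × Int × String :=
  g.2.foldl (fun cur m =>
    (cur.1 ++ PySem.Str.slice m.1 (some (max 0 (m.2.1 - cur.2.2.1))) none,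
     cur.2.1, m.2.2.1, m.2.2.2)) g.1

def merge_adjacent_entities_alt (entities : List (String × Int × Int × String)) : List (String × Int × Int × String) :=
  if entities = [] then []
  else
    match PySem.List.sorted entities (fun x => x.2.1) with
    | [] => []
    | first :: rest => (altGroupLoop first (first, []) [] rest).map altMergeGroup

-- ===== PRECONDITION & SPEC =====
def Spec_merge_adjacent_entities (entities : List (String × Int × Int × String)) (out : List (String × Int × Int × String)) : Prop := out = merge_adjacent_entities_alt entities
instance (entities : List (String × Int × Int × String)) (out : List (String × Int × Int × String)) : Decidable (Spec_merge_adjacent_entities entities out) := by unfold Spec_merge_adjacent_entities; infer_instance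

-- ===== CLAIM (what is proved, stated in full; the proofs are below) =====
def Claim_equal_merge_adjacent_entities : Prop := ∀ (entities : List (String × Int × Int × String)), Dom_merge_adjacent_entities entities → Spec_merge_adjacent_entities entities (merge_adjacent_entities entities)

-- ===== LEMMAS AND PROOFS =====

-- A's merge step, named for the proofs.
def mergeOne (c m : String × Int × Int × String) : String × Int × Int × String :=
  (c.1 ++ PySem.Str.slice m.1 (some (max 0 (m.2.1 - c.2.2.1))) none,
   c.2.1, m.2.2.1, m.2.2.2)

theorem altMergeGroup_eq_foldl (first : String × Int × Int × String)
    (gs : List (String × Int × Int × String)) :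
    altMergeGroup (first, gs) = gs.foldl mergeOne first := rfl

-- The folded accumulator ends (and is typed) like the group's last member.
theorem getLastD_proj (gs : List (String × Int × Int × String))
    (x y : String × Int × Int × String)
    (h1 : x.2.2.1 = y.2.2.1) (h2 : x.2.2.2 = y.2.2.2) :
    (gs.getLastD x).2.2.1 = (gs.getLastD y).2.2.1 ∧
    (gs.getLastD x).2.2.2 = (gs.getLastD y).2.2.2 := by
  cases gs with
  | nil => exact ⟨h1, h2⟩
  | cons a l => rw [List.getLastD_cons, List.getLastD_cons]; exact ⟨rfl, rfl⟩

theorem foldl_mergeOne_last (gs : List (String × Int × Int × String))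
    (first : String × Int × Int × String) :
    (gs.foldl mergeOne first).2.2.1 = (gs.getLastD first).2.2.1 ∧
    (gs.foldl mergeOne first).2.2.2 = (gs.getLastD first).2.2.2 := by
  induction gs generalizing first with
  | nil => exact ⟨rfl, rfl⟩
  | cons g gs ih =>
    rw [List.foldl_cons, List.getLastD_cons]
    obtain ⟨p, q⟩ := getLastD_proj gs (mergeOne first g) g rfl rfl
    exact ⟨(ih (mergeOne first g)).1.trans p, (ih (mergeOne first g)).2.trans q⟩

-- Pushing the outer accumulator out of B's grouping loop.
theorem altGroupLoop_acc (l : List (String × Int × Int × String))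
    (prev : String × Int × Int × String)
    (group : (String × Int × Int × String) × List (String × Int × Int × String))
    (groups : List ((String × Int × Int × String) × List (String × Int × Int × String))) :
    altGroupLoop prev group groups l = groups ++ altGroupLoop prev group [] l := by
  induction l generalizing prev group groups with
  | nil => simp [altGroupLoop]
  | cons e es ih =>
    by_cases h : e.2.2.2 = prev.2.2.2 ∧ e.2.1 ≤ prev.2.2.1 + 3
    · simp only [altGroupLoop, if_pos h]
      exact ih e (group.1, group.2 ++ [e]) groups
    · simp only [altGroupLoop, if_neg h]
      rw [ih e (e, []) (groups ++ [group]), ih e (e, []) ([] ++ [group])]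
      simp

-- Main invariant: A's loop with the partially merged group as 'current' computes the
-- already-emitted entities followed by B's merged groups.
theorem aLoop_eq_groups (l : List (String × Int × Int × String))
    (first : String × Int × Int × String)
    (gs : List (String × Int × Int × String))
    (merged : List (String × Int × Int × String)) :
    aLoop (some (gs.foldl mergeOne first)) merged l =
      merged ++ (altGroupLoop (gs.getLastD first) (first, gs) [] l).map altMergeGroup := by
  induction l generalizing first gs merged with
  | nil => simp [aLoop, altGroupLoop, altMergeGroup_eq_foldl]
  | cons e es ih =>
    obtain ⟨hend, hty⟩ := foldl_mergeOne_last gs first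
    by_cases h : e.2.2.2 = (gs.getLastD first).2.2.2 ∧ e.2.1 ≤ (gs.getLastD first).2.2.1 + 3
    · have hA : (gs.foldl mergeOne first).2.2.2 = e.2.2.2 ∧
          e.2.1 ≤ (gs.foldl mergeOne first).2.2.1 + 3 := by
        constructor
        · rw [hty, h.1]
        · rw [hend]; exact h.2
      show aLoop _ merged (e :: es) = _
      rw [show aLoop (some (gs.foldl mergeOne first)) merged (e :: es) =
            aLoop (some (mergeOne (gs.foldl mergeOne first) e)) merged es by
          simp only [aLoop, if_pos hA]; rfl]
      have hfold : mergeOne (gs.foldl mergeOne first) e = (gs ++ [e]).foldl mergeOne first := by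
        simp [List.foldl_append]
      rw [hfold, ih first (gs ++ [e]) merged]
      have hlast : (gs ++ [e]).getLastD first = e := by
        simp [List.getLastD_eq_getLast?]
      rw [hlast]
      simp only [altGroupLoop, if_pos h]
    · have hA : ¬ ((gs.foldl mergeOne first).2.2.2 = e.2.2.2 ∧
          e.2.1 ≤ (gs.foldl mergeOne first).2.2.1 + 3) := by
        rw [hend, hty]
        intro hc; exact h ⟨hc.1.symm ▸ rfl, hc.2⟩
      have hstep : aLoop (some (gs.foldl mergeOne first)) merged (e :: es) =
          aLoop (some e) (merged ++ [gs.foldl mergeOne first]) es := by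
        simp only [aLoop, if_neg hA]
      have hih := ih e [] (merged ++ [gs.foldl mergeOne first])
      simp only [List.foldl_nil, List.getLastD_nil] at hih
      rw [hstep, hih]
      simp only [altGroupLoop, if_neg h]
      rw [altGroupLoop_acc es e (e, []) ([] ++ [(first, gs)])]
      simp [altMergeGroup_eq_foldl]

-- ===== VERDICT (by name: the statement is the Claim_ definition above) =====
theorem merge_adjacent_entities_spec : Claim_equal_merge_adjacent_entities := by
  intro entities _
  unfold Spec_merge_adjacent_entities merge_adjacent_entities merge_adjacent_entities_alt
  by_cases he : entities = []
  · simp [he]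
  · simp only [if_neg he]
    have hne : PySem.List.sorted entities (fun x => x.2.1) ≠ [] := by
      simp only [ne_eq, PySem.List.sorted_eq_nil_iff]; exact he
    obtain ⟨first, rest, hs⟩ := List.exists_cons_of_ne_nil hne
    rw [hs]
    show aLoop (some first) [] rest = _
    have := aLoop_eq_groups rest first [] []
    simpa using this
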